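-- pv_equiv track=rewrite | github.com/djeada/Algorithms-And-Data-Structures | src/dynamic_programming/python/all_construct/src/all_construct.py | all_construct_memo
-- ===== SOURCE A (Python) =====
-- from typing import List
--
-- def all_construct_memo(target: str, word_bank: List[str]) -> List[List[str]]:
--     """
--     Find all ways to construct target from words in word_bank.
--
--     Uses memoization for efficient computation.
--
--     Args:
--         target: The target string to construct.
--         word_bank: List of words that can be used (can be reused).
--
--     Returns:
--         List of all possible combinations of words that construct target.
--     """
--
--     def recurse(target: str, memo: dict) -> List[List[str]]:
--         if not target:
--             return [[]]
--
--         if target in memo: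
--             return memo[target]
--
--         result: List[List[str]] = []
--         for word in word_bank:
--             if target.startswith(word):
--                 suffix_ways = recurse(target[len(word) :], memo)
--                 result.extend([way + [word] for way in suffix_ways])
--
--         memo[target] = result
--         return result
--
--     return recurse(target, {})
-- ===== SOURCE B (Python) =====
-- from typing import List
--
-- def all_construct_memo(target: str, word_bank: List[str]) -> List[List[str]]:
--     """Bottom-up tabulation over target positions instead of top-down memoized recursion."""
--     n = len(target)
--     ways: List[List[List[str]]] = [[] for _ in range(n + 1)]
--     ways[n] = [[]]
--     for i in range(n - 1, -1, -1):
--         for word in word_bank: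
--             if target[i:].startswith(word):
--                 ways[i].extend([way + [word] for way in ways[i + len(word)]])
--     return ways[0]
-- ===== Notes on version B (the rewrite author's own statement) =====
-- stated objective: alternative
-- what changed: Replaces the top-down memoized recursion (with a threaded memo dict) by bottom-up tabulation: a ways table indexed by target position, filled from the end of the target to the front.
import Mathlib
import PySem

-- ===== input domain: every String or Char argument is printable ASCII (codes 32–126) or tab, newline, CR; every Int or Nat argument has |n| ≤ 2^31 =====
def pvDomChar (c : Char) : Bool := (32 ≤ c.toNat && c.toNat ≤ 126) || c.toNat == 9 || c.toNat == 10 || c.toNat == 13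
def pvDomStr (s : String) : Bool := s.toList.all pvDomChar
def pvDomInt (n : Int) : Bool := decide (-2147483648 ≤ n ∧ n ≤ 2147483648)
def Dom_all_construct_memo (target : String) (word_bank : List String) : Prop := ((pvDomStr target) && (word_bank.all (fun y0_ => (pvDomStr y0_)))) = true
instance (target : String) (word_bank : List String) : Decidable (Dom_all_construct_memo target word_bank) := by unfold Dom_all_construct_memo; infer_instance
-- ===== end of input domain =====

-- B replaces top-down memoized recursion with bottom-up tabulation over target positions (same cost; equivalence of RETURN values is proved).

-- ===== PORT A =====
-- A's recursion with the memo dict threaded through; the target is carried as its character list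
-- (Python string keys/equality coincide with List Char equality). The fuel parameter only makes the
-- recursion total: on every input admitted by Pre_ the fuel target.length + 1 is never exhausted.
mutual
  -- recurse(target, memo)
  def pvRecA (word_bank : List String) : Nat → List Char → PySem.Dict (List Char) (List (List String)) → (List (List String)) × PySem.Dict (List Char) (List (List String))
    | 0, _, memo => ([], memo)                        -- fuel exhausted: unreachable under Pre_
    | fuel + 1, t, memo =>
      if t = [] then ([[]], memo)                      -- if not target: return [[]]
      else
        match PySem.Dict.get? memo t with              -- if target in memo: return memo[target]
        | some r => (r, memo)
        | none =>
          let (result, memo') := pvLoopA word_bank fuel word_bank t memo []   -- for word in word_bank: …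
          (result, PySem.Dict.insert memo' t result)   -- memo[target] = result
    termination_by fuel _ _ => (fuel, 0)
  -- the `for word in word_bank` loop accumulating `result`
  def pvLoopA (word_bank : List String) : Nat → List String → List Char → PySem.Dict (List Char) (List (List String)) → List (List String) → (List (List String)) × PySem.Dict (List Char) (List (List String))
    | _, [], _, memo, acc => (acc, memo)
    | fuel, w :: ws, t, memo, acc =>
      if w.toList.isPrefixOf t then                    -- target.startswith(word)
        let (sw, memo') := pvRecA word_bank fuel (t.drop w.toList.length) memo   -- recurse(target[len(word):], memo)
        pvLoopA word_bank fuel ws t memo' (acc ++ sw.map (fun way => way ++ [w]))  -- result.extend([way + [word] for way in suffix_ways])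
      else pvLoopA word_bank fuel ws t memo acc
  termination_by fuel ws _ _ _ => (fuel, ws.length + 1)
end

def all_construct_memo (target : String) (word_bank : List String) : List (List String) :=
  (pvRecA word_bank (target.toList.length + 1) target.toList PySem.Dict.empty).1

-- ===== PORT B =====
-- pvTbl builds B's `ways` table back-to-front: the table for the suffix starting at position i is
-- computed from the tables of later positions (structural recursion = the descending-i loop).
-- The `w.toList = []` branch is exact: for the empty word, Python's `ways[i + len(word)]` aliases
-- the very list being extended, i.e. the entries accumulated so far (acc).
def pvTblRow (word_bank : List String) (l : List Char) (t : List (List (List String))) : List (List String) :=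
  word_bank.foldl
    (fun acc w =>
      if w.toList.isPrefixOf l then
        if w.toList = [] then acc ++ acc.map (fun way => way ++ [w])
        else acc ++ (t.getD (w.toList.length - 1) []).map (fun way => way ++ [w])
      else acc) []

def pvTbl (word_bank : List String) : List Char → List (List (List String))
  | [] => [[[]]]                                       -- ways[n] = [[]]
  | c :: rest =>
    let t := pvTbl word_bank rest
    pvTblRow word_bank (c :: rest) t :: t

def all_construct_memo_alt (target : String) (word_bank : List String) : List (List String) :=
  (pvTbl word_bank target.toList).headD []             -- return ways[0]

-- ===== PRECONDITION & SPEC =====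
-- Pre_ excludes exactly the inputs on which A raises (RecursionError): an empty word in the bank
-- together with a nonempty target makes A's recursion call itself on an unchanged target forever.
def Pre_all_construct_memo (target : String) (word_bank : List String) : Prop :=
  "" ∈ word_bank → target = ""
instance (target : String) (word_bank : List String) : Decidable (Pre_all_construct_memo target word_bank) := by unfold Pre_all_construct_memo; infer_instance

def pvWitness_all_construct_memo : String × List String := ("purple", ["purp", "p", "ur", "le", "purpl"])

def Spec_all_construct_memo (target : String) (word_bank : List String) (out : List (List String)) : Prop := out = all_construct_memo_alt target word_bank
instance (target : String) (word_bank : List String) (out : List (List String)) : Decidable (Spec_all_construct_memo target word_bank out) := by unfold Spec_all_construct_memo; infer_instance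

-- ===== CLAIM (what is proved, stated in full; the proofs are below) =====
def Claim_equal_all_construct_memo : Prop := ∀ (target : String) (word_bank : List String), Dom_all_construct_memo target word_bank → Pre_all_construct_memo target word_bank → Spec_all_construct_memo target word_bank (all_construct_memo target word_bank)

-- ===== LEMMAS AND PROOFS =====

-- the canonical value: B's answer for a suffix, as a function of the character list
def pvCnt (word_bank : List String) (l : List Char) : List (List String) :=
  (pvTbl word_bank l).headD []

lemma pvTbl_getD (word_bank : List String) (l : List Char) :
    ∀ i, i ≤ l.length → (pvTbl word_bank l).getD i [] = pvCnt word_bank (l.drop i) := by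
  induction l with
  | nil =>
    intro i hi
    have : i = 0 := by simpa using hi
    subst this
    simp [pvTbl, pvCnt]
  | cons c rest ih =>
    intro i hi
    cases i with
    | zero => simp [pvTbl, pvCnt]
    | succ j =>
      simp only [pvTbl, List.getD_cons_succ, List.drop_succ_cons]
      exact ih j (by simpa using hi)

lemma pvCnt_cons (word_bank : List String) (hne : "" ∉ word_bank) (c : Char) (rest : List Char) :
    pvCnt word_bank (c :: rest) =
      word_bank.foldl
        (fun acc w =>
          if w.toList.isPrefixOf (c :: rest) then
            acc ++ (pvCnt word_bank ((c :: rest).drop w.toList.length)).map (fun way => way ++ [w])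
          else acc) [] := by
  have hrow : pvCnt word_bank (c :: rest) = pvTblRow word_bank (c :: rest) (pvTbl word_bank rest) := by
    simp [pvCnt, pvTbl]
  rw [hrow, pvTblRow]
  apply PySem.List.foldl_congr_mem
  intro acc w hw
  by_cases hp : w.toList.isPrefixOf (c :: rest)
  · have hwne : w.toList ≠ [] := by
      intro h
      have hw0 : w = "" := by simp_all
      exact hne (hw0 ▸ hw)
    have hlen : w.toList.length - 1 ≤ rest.length := by
      have := (List.isPrefixOf_iff_prefix.mp hp).length_le
      simp at this ⊢; omega
    have hget := pvTbl_getD word_bank rest (w.toList.length - 1) hlen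
    have hdrop : rest.drop (w.toList.length - 1) = (c :: rest).drop w.toList.length := by
      cases hlw : w.toList with
      | nil => exact absurd hlw hwne
      | cons x xs => simp
    rw [if_pos hp, if_pos hp, if_neg hwne, hget, hdrop]
  · simp [hp]

def pvGood (word_bank : List String) (memo : PySem.Dict (List Char) (List (List String))) : Prop :=
  ∀ k v, PySem.Dict.get? memo k = some v → v = pvCnt word_bank k

lemma pvRecA_correct (word_bank : List String) (hne : "" ∉ word_bank) :
    ∀ fuel (t : List Char) memo, pvGood word_bank memo → t.length < fuel →
      (pvRecA word_bank fuel t memo).1 = pvCnt word_bank t ∧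
        pvGood word_bank (pvRecA word_bank fuel t memo).2 := by
  intro fuel
  induction fuel with
  | zero => intro t memo _ ht; exact absurd ht (Nat.not_lt_zero _)
  | succ fuel ih =>
    intro t memo hg ht
    by_cases h0 : t = []
    · subst h0
      refine ⟨by simp [pvRecA, pvCnt, pvTbl], ?_⟩
      simpa [pvRecA] using hg
    · -- the for-loop: pvLoopA computes the foldl of pvCnt values and keeps the memo good
      have hloop : ∀ ws, (∀ w ∈ ws, w ∈ word_bank) → ∀ memo acc, pvGood word_bank memo →
          (pvLoopA word_bank fuel ws t memo acc).1 =
            ws.foldl (fun a w =>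
              if w.toList.isPrefixOf t then
                a ++ (pvCnt word_bank (t.drop w.toList.length)).map (fun way => way ++ [w])
              else a) acc ∧
          pvGood word_bank (pvLoopA word_bank fuel ws t memo acc).2 := by
        intro ws
        induction ws with
        | nil =>
          intro _ memo acc hgm
          simp only [pvLoopA, List.foldl_nil]
          exact ⟨trivial, hgm⟩
        | cons w ws ihw =>
          intro hsub memo acc hgm
          by_cases hp : w.toList.isPrefixOf t
          · have hwne : w.toList ≠ [] := by
              intro h
              have hw0 : w = "" := by simp_all
              exact hne (hw0 ▸ hsub w (by simp))
            have hw1 : w.toList.length ≥ 1 := by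
              cases hlw : w.toList with
              | nil => exact absurd hlw hwne
              | cons x xs => simp
            have hple := (List.isPrefixOf_iff_prefix.mp hp).length_le
            have hlt : (t.drop w.toList.length).length < fuel := by
              simp only [List.length_drop]
              omega
            rcases hre : pvRecA word_bank fuel (t.drop w.toList.length) memo with ⟨sw, memo'⟩
            have hrec := ih (t.drop w.toList.length) memo hgm hlt
            rw [hre] at hrec
            have h1 : sw = pvCnt word_bank (t.drop w.toList.length) := hrec.1
            have h2 : pvGood word_bank memo' := hrec.2
            subst h1
            simp only [pvLoopA, hre, hp, if_true, List.foldl_cons]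
            exact ihw (fun u hu => hsub u (by simp [hu])) memo'
              (acc ++ (pvCnt word_bank (t.drop w.toList.length)).map (fun way => way ++ [w])) h2
          · simp only [pvLoopA, hp, if_false, List.foldl_cons, Bool.false_eq_true]
            exact ihw (fun u hu => hsub u (by simp [hu])) memo acc hgm
      obtain ⟨c, rest, rfl⟩ : ∃ c rest, t = c :: rest := by
        cases t with
        | nil => exact absurd rfl h0
        | cons c rest => exact ⟨c, rest, rfl⟩
      rw [pvRecA]
      simp only [if_neg h0]
      cases hm : PySem.Dict.get? memo (c :: rest) with
      | some r => exact ⟨hg _ r hm, hg⟩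
      | none =>
        rcases hlp : pvLoopA word_bank fuel word_bank (c :: rest) memo [] with ⟨res, m'⟩
        have hl := hloop word_bank (fun _ h => h) memo [] hg
        rw [hlp] at hl
        have hres : res = pvCnt word_bank (c :: rest) := by
          rw [pvCnt_cons word_bank hne c rest]
          exact hl.1
        refine ⟨hres, ?_⟩
        intro k v hk
        by_cases hkt : k = c :: rest
        · subst hkt
          rw [PySem.Dict.get?_insert_self] at hk
          cases hk
          exact hres
        · rw [PySem.Dict.get?_insert_of_ne _ _ hkt] at hk
          exact hl.2 k v hk

-- ===== VERDICT (by name: the statement is the Claim_ definition above) =====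
theorem all_construct_memo_spec : Claim_equal_all_construct_memo := by
  intro target word_bank _ hpre
  unfold Spec_all_construct_memo all_construct_memo all_construct_memo_alt
  by_cases h : target = ""
  · subst h
    simp [pvRecA, pvTbl]
  · have hne : "" ∉ word_bank := fun hm => h (hpre hm)
    have hgood : pvGood word_bank PySem.Dict.empty := by
      intro k v hk
      rw [PySem.Dict.get?_empty] at hk
      cases hk
    have := pvRecA_correct word_bank hne (target.toList.length + 1) target.toList
      PySem.Dict.empty hgood (Nat.lt_succ_self _)
    exact this.1
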